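-- pv_equiv track=rewrite | github.com/aha5811/AoC2023py | day15.py | _part1
-- ===== SOURCE A (Python) =====
-- def _part1(s):
--     res = 0
--
--     for step in s.split(','):
--         sres = 0
--         for c in list(step):
--             sres += ord(c)
--             sres *= 17
--             sres %= 256
--         res += sres
--
--     return res
-- ===== SOURCE B (Python) =====
-- def _part1(s):
--     res = 0
--     sres = 0
--     for c in s:
--         if c == ',':
--             res += sres
--             sres = 0
--         else:
--             sres = ((sres + ord(c)) * 17) % 256
--     return res + sres
-- ===== Notes on version B (the rewrite author's own statement) =====
-- stated objective: simpler
-- what changed: B replaces split on the delimiter plus a nested per-step loop with one flat scan over the raw string that accumulates a per-step hash, flushing it into the total at each delimiter and once at the end, so no intermediate list of steps is built.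
import Mathlib
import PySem

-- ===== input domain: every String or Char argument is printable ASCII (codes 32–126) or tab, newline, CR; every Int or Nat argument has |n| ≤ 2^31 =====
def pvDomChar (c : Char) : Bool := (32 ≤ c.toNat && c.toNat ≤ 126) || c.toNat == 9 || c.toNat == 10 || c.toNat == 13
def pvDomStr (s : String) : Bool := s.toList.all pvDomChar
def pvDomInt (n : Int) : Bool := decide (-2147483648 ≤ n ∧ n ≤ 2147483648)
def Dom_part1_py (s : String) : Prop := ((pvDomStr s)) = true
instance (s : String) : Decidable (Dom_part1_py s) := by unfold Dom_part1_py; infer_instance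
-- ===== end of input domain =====

-- B replaces split(',') + a nested per-step loop with one flat scan that flushes the
-- per-step hash into the total at each comma and once at the end (objective: simpler).

-- ===== PORT A =====
def part1_py (s : String) : Int :=
  (PySem.Chars.splitOn s.toList [',']).foldl
    (fun res step =>
      res + step.foldl (fun sres c => PySem.Int.mod ((sres + (c.toNat : Int)) * 17) 256) 0)
    0

-- ===== PORT B =====
def part1_py_alt (s : String) : Int :=
  let p :=
    s.toList.foldl
      (fun (p : Int × Int) c =>
        if c = ',' then (p.1 + p.2, 0)
        else (p.1, PySem.Int.mod ((p.2 + (c.toNat : Int)) * 17) 256))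
      (0, 0)
  p.1 + p.2

-- ===== PRECONDITION & SPEC =====
def Spec_part1_py (s : String) (out : Int) : Prop := out = part1_py_alt s
instance (s : String) (out : Int) : Decidable (Spec_part1_py s out) := by unfold Spec_part1_py; infer_instance

-- ===== CLAIM (what is proved, stated in full; the proofs are below) =====
def Claim_equal_part1_py : Prop := ∀ (s : String), Dom_part1_py s → Spec_part1_py s (part1_py s)

-- ===== LEMMAS AND PROOFS =====

-- the single-character hash step shared by both ports
def pvH (sres : Int) (c : Char) : Int := PySem.Int.mod ((sres + (c.toNat : Int)) * 17) 256

-- structural characterisation of splitting on ',' : (first piece, remaining pieces)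
def pvSplit1 : List Char → List Char × List (List Char)
  | [] => ([], [])
  | c :: rest =>
    let r := pvSplit1 rest
    if c = ',' then ([], r.1 :: r.2) else (c :: r.1, r.2)

theorem pvSplitOn_go_eq (l : List Char) : ∀ (fuel : Nat) (cur : List Char) (acc : List (List Char)),
    l.length ≤ fuel →
    PySem.Chars.splitOn.go [','] fuel l cur acc
      = acc.reverse ++ ((cur.reverse ++ (pvSplit1 l).1) :: (pvSplit1 l).2) := by
  induction l with
  | nil =>
    intro fuel cur acc _
    cases fuel <;> simp [PySem.Chars.splitOn.go, pvSplit1]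
  | cons c rest ih =>
    intro fuel cur acc hf
    cases fuel with
    | zero => simp at hf
    | succ f =>
      rw [PySem.Chars.splitOn.go.eq_def]
      simp only [List.isPrefixOf, Bool.and_true]
      by_cases hc : c = ','
      · subst hc
        simp only [beq_self_eq_true, if_pos, pvSplit1]
        have hd : List.drop [','].length (',' :: rest) = rest := rfl
        rw [hd, ih f [] (cur.reverse :: acc) (by simpa using Nat.succ_le_succ_iff.mp hf)]
        simp
      · have hb : ((',' : Char) == c) = false := beq_eq_false_iff_ne.mpr (Ne.symm hc)
        simp only [hb, Bool.false_eq_true, if_false, pvSplit1, hc]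
        rw [ih f (c :: cur) acc (by simpa using Nat.succ_le_succ_iff.mp hf)]
        simp

theorem pvSplitOn_eq (l : List Char) :
    PySem.Chars.splitOn l [','] = (pvSplit1 l).1 :: (pvSplit1 l).2 := by
  unfold PySem.Chars.splitOn
  rw [pvSplitOn_go_eq l (l.length + 1) [] [] (Nat.le_succ _)]
  simp

-- B's flat scan equals A's "sum of per-piece hashes", with the running piece hashed from sres
theorem pvFoldB (l : List Char) : ∀ (res sres : Int),
    (let p := l.foldl
        (fun (p : Int × Int) c =>
          if c = ',' then (p.1 + p.2, 0)
          else (p.1, PySem.Int.mod ((p.2 + (c.toNat : Int)) * 17) 256)) (res, sres)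
     p.1 + p.2)
      = ((pvSplit1 l).2).foldl
          (fun r step => r + step.foldl pvH 0)
          (res + (pvSplit1 l).1.foldl pvH sres) := by
  induction l with
  | nil => intro res sres; simp [pvSplit1]
  | cons c rest ih =>
    intro res sres
    by_cases hc : c = ','
    · subst hc
      simp only [List.foldl_cons, pvSplit1, if_true]
      rw [ih (res + sres) 0]
      simp
    · simp only [List.foldl_cons, pvSplit1, hc, if_false]
      rw [ih res (PySem.Int.mod ((sres + (c.toNat : Int)) * 17) 256)]
      simp [pvH]

-- ===== VERDICT (by name: the statement is the Claim_ definition above) =====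
theorem part1_py_spec : Claim_equal_part1_py := by
  intro s _
  unfold Spec_part1_py part1_py part1_py_alt
  rw [pvSplitOn_eq, pvFoldB s.toList 0 0]
  rfl
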